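-- pv_equiv track=rewrite | github.com/electron/electron | script/check-patches.py | map_diffs
-- ===== SOURCE A (Python) =====
-- def map_diffs(patch_lines):
--   """Turns the lines of the patchfiles into a map, where the keys are the files
--   that are changed by the patch (the entire diff --... line) and the associated
--   values are the actual changes"""
--   diffs = {}
--
--   key = patch_lines[0].strip()
--   diffs[key] = []
--   for line in patch_lines[1:]:
--     if line.startswith('diff -'):
--       key = line.strip()
--       diffs[key] = []
--     else:
--       diffs[key].append(line)
--
--   return diffs
-- ===== SOURCE B (Python) =====
-- def map_diffs(patch_lines):
--   """Segment-scan re-implementation: find each segment [i, j) by scanning ahead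
--   to the next 'diff -' boundary, then assign the whole segment at once."""
--   n = len(patch_lines)
--   diffs = {}
--   i = 0
--   while i < n:
--     j = i + 1
--     while j < n and not patch_lines[j].startswith('diff -'):
--       j += 1
--     diffs[patch_lines[i].strip()] = patch_lines[i + 1:j]
--     i = j
--   return diffs
-- ===== Notes on version B (the rewrite author's own statement) =====
-- stated objective: alternative
-- what changed: A walks line by line appending each line to the current dict entry; B scans with two indices to find each 'diff -' boundary and assigns the whole slice patch_lines[i+1:j] to the stripped header at once (dict assignment keeps A's overwrite-on-duplicate behaviour).
-- crash fix: On the empty list A raises IndexError (patch_lines[0]); B's while loop never runs and it returns the empty dict {}. — e.g. on map_diffs([]): A raises IndexError, B returns []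
import Mathlib
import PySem

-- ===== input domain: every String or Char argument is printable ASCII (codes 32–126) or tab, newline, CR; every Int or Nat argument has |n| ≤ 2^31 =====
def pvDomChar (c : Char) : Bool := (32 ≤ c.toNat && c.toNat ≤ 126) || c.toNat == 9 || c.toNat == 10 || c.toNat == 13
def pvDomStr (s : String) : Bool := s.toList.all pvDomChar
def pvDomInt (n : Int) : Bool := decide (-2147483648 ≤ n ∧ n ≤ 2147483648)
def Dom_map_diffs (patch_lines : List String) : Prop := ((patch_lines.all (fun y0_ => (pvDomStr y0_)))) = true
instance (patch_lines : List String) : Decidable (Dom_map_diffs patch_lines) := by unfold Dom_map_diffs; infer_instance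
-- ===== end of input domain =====

-- B replaces A's per-line append-to-current-dict-entry loop by a two-index boundary
-- scan that assigns each whole segment slice at once (objective: alternative decomposition).
-- Equivalence is about the RETURN value; neither version mutates its argument.

-- ===== PORT A =====
-- Literal port of A: key := first line stripped, then a fold over the remaining
-- lines carrying (dict, current key); 'diff -' lines open a fresh (emptied) entry,
-- other lines are appended to the current entry.
def map_diffs (patch_lines : List String) : List (String × List String) :=
  match patch_lines with
  | [] => []  -- Python raises IndexError on patch_lines[0] here; excluded by Pre_map_diffs
  | first :: rest =>
    let key := PySem.Str.strip first
    let st := rest.foldl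
      (fun (st : PySem.Dict String (List String) × String) line =>
        if PySem.Str.startswith line "diff -" then
          (st.1.insert (PySem.Str.strip line) [], PySem.Str.strip line)
        else
          (st.1.modify st.2 [] (fun v => v ++ [line]), st.2))
      ((PySem.Dict.empty).insert key [], key)
    st.1.items

-- ===== PORT B =====
-- inner 'while j < n and not patch_lines[j].startswith("diff -")' loop of Source B
-- (indices stay in range whenever 0 ≤ j; pyGetD's default is never read there)
def altFind (ls : List String) (n j : Int) : Int :=
  if h : j < n ∧ ¬ (PySem.Str.startswith (PySem.List.pyGetD ls j "") "diff -") then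
    altFind ls n (j + 1)
  else j
termination_by (n - j).toNat
decreasing_by omega

-- termination fact the outer loop cites: the inner scan never moves backwards
theorem altFind_le (ls : List String) (n j : Int) : j ≤ altFind ls n j := by
  fun_induction altFind ls n j with
  | case1 j h ih => omega
  | case2 j h => omega

-- outer 'while i < n' loop of Source B: slice out segment [i+1, j), key it by line i stripped
def altLoop (ls : List String) (n : Int) (d : PySem.Dict String (List String)) (i : Int) :
    PySem.Dict String (List String) :=
  if h : i < n then
    altLoop ls n
      (d.insert (PySem.Str.strip (PySem.List.pyGetD ls i ""))
        (PySem.List.slice ls (some (i + 1)) (some (altFind ls n (i + 1)))))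
      (altFind ls n (i + 1))
  else d
termination_by (n - i).toNat
decreasing_by
  have := altFind_le ls n (i + 1)
  omega

def map_diffs_alt (patch_lines : List String) : List (String × List String) :=
  (altLoop patch_lines (patch_lines.length : Int) PySem.Dict.empty 0).items

-- ===== PRECONDITION & SPEC =====
-- Pre_ excludes exactly the empty list, on which Python A raises IndexError at patch_lines[0].
def Pre_map_diffs (patch_lines : List String) : Prop := patch_lines ≠ []
instance (patch_lines : List String) : Decidable (Pre_map_diffs patch_lines) := by
  unfold Pre_map_diffs; infer_instance
def pvWitness_map_diffs : List String := ["diff -x a b", "-foo", "+bar"]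

-- On the empty list A raises IndexError (patch_lines[0]); B returns the empty dict.
def Raises_map_diffs (patch_lines : List String) : Prop := patch_lines = []
instance (patch_lines : List String) : Decidable (Raises_map_diffs patch_lines) := by
  unfold Raises_map_diffs; infer_instance
def pvRaiseWitness_map_diffs : List String := []
def pvRaiseWitnessOut_map_diffs : List (String × List String) := []

def Spec_map_diffs (patch_lines : List String) (out : List (String × List String)) : Prop :=
  out = map_diffs_alt patch_lines
instance (patch_lines : List String) (out : List (String × List String)) :
    Decidable (Spec_map_diffs patch_lines out) := by unfold Spec_map_diffs; infer_instance

-- ===== CLAIM (what is proved, stated in full; the proofs are below) =====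
def Claim_equal_map_diffs : Prop := ∀ (patch_lines : List String), Dom_map_diffs patch_lines →
  Pre_map_diffs patch_lines → Spec_map_diffs patch_lines (map_diffs patch_lines)
def Claim_raises_map_diffs : Prop :=
  (∀ (patch_lines : List String), Dom_map_diffs patch_lines → Raises_map_diffs patch_lines →
    ¬ Pre_map_diffs patch_lines) ∧
  (Dom_map_diffs (pvRaiseWitness_map_diffs) ∧ Raises_map_diffs (pvRaiseWitness_map_diffs) ∧
    map_diffs_alt (pvRaiseWitness_map_diffs) = pvRaiseWitnessOut_map_diffs)

-- ===== LEMMAS AND PROOFS =====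

-- the boundary test both programs use
def pB (l : String) : Bool := PySem.Str.startswith l "diff -"

-- common reference: build the dict segment by segment, carrying the lines
-- accumulated so far for the segment keyed by `key`
def segBuild (d : PySem.Dict String (List String)) (key : String) (acc : List String) :
    List String → PySem.Dict String (List String)
  | [] => d.insert key acc
  | l :: t =>
    if pB l then segBuild (d.insert key acc) (PySem.Str.strip l) [] t
    else segBuild d key (acc ++ [l]) t

theorem modify_insert_self (d : PySem.Dict String (List String)) (k : String)
    (v : List String) (f : List String → List String) :
    (d.insert k v).modify k [] f = d.insert k (f v) := by
  rw [PySem.Dict.modify, PySem.Dict.getD_insert_self, PySem.Dict.insert_insert_self]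

-- A's fold equals the segment-wise reference build
theorem foldA_eq_segBuild (lines : List String) :
    ∀ (d : PySem.Dict String (List String)) (key : String) (acc : List String),
    (lines.foldl
      (fun (st : PySem.Dict String (List String) × String) line =>
        if PySem.Str.startswith line "diff -" then
          (st.1.insert (PySem.Str.strip line) [], PySem.Str.strip line)
        else
          (st.1.modify st.2 [] (fun v => v ++ [line]), st.2))
      (d.insert key acc, key)).1 = segBuild d key acc lines := by
  induction lines with
  | nil => intro d key acc; simp [segBuild]
  | cons l t ih =>
    intro d key acc
    by_cases hl : PySem.Str.startswith l "diff -"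
    · simp only [List.foldl_cons, segBuild, pB, hl, if_pos]
      exact ih (d.insert key acc) (PySem.Str.strip l) []
    · simp only [List.foldl_cons, segBuild, pB, hl, if_neg, Bool.false_eq_true,
        not_false_iff, modify_insert_self]
      exact ih d key (acc ++ [l])

-- segBuild can consume a maximal non-boundary run at once
theorem segBuild_split (lines : List String) :
    ∀ (d : PySem.Dict String (List String)) (key : String) (acc : List String),
    segBuild d key acc lines =
      match lines.dropWhile (fun l => !pB l) with
      | [] => d.insert key (acc ++ lines.takeWhile (fun l => !pB l))
      | l :: t =>
        segBuild (d.insert key (acc ++ lines.takeWhile (fun l => !pB l)))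
          (PySem.Str.strip l) [] t := by
  induction lines with
  | nil => intro d key acc; simp [segBuild]
  | cons l t ih =>
    intro d key acc
    by_cases hl : pB l
    · simp [segBuild, hl, List.dropWhile, List.takeWhile]
    · simp only [segBuild, if_neg hl, List.dropWhile, List.takeWhile]
      rw [ih d key (acc ++ [l])]
      simp [hl]

-- the inner scan lands exactly past the maximal non-boundary run
theorem altFind_spec (ls : List String) (j : Int) (h0 : 0 ≤ j) :
    altFind ls (ls.length : Int) j =
      j + (((ls.drop j.toNat).takeWhile (fun l => !pB l)).length : Int) := by
  fun_induction altFind ls (ls.length : Int) j with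
  | case1 j h ih =>
    have h0j : 0 ≤ j := h0
    have hj : j.toNat < ls.length := by omega
    have hget : PySem.List.pyGetD ls j "" = ls[j.toNat] :=
      PySem.List.pyGetD_eq_getElem ls "" h0j (by exact_mod_cast h.1)
    have hdrop : ls.drop j.toNat = ls[j.toNat] :: ls.drop (j.toNat + 1) :=
      List.drop_eq_getElem_cons hj
    have hnb : (!pB ls[j.toNat]) = true := by
      simp only [pB, Bool.not_eq_true']
      exact Bool.not_eq_true _ ▸ (fun hc => h.2 (hget ▸ hc))
    rw [ih (by omega)]
    rw [hdrop, List.takeWhile_cons, if_pos hnb]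
    have h1 : (j + 1).toNat = j.toNat + 1 := by omega
    rw [h1]
    simp only [List.length_cons]
    push_cast
    ring
  | case2 j h =>
    by_cases hj : j < (ls.length : Int)
    · have hget : PySem.List.pyGetD ls j "" = ls[j.toNat] :=
        PySem.List.pyGetD_eq_getElem ls "" h0 (by exact_mod_cast hj)
      have hsw : PySem.Str.startswith (PySem.List.pyGetD ls j "") "diff -" := by
        by_contra hc; exact h ⟨hj, hc⟩
      have hdrop : ls.drop j.toNat = ls[j.toNat] :: ls.drop (j.toNat + 1) :=
        List.drop_eq_getElem_cons (by omega)
      have hswg : pB ls[j.toNat] = true := by rw [pB, ← hget]; exact hsw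
      rw [hdrop, List.takeWhile_cons, if_neg (by simp [hswg])]
      simp
    · have : ls.drop j.toNat = [] := List.drop_eq_nil_of_le (by omega)
      rw [this]
      simp

-- the outer scan equals the reference build on the remaining lines
theorem altLoop_eq (ls : List String) :
    ∀ (k : Nat) (d : PySem.Dict String (List String)) (i : Int), 0 ≤ i →
    i < (ls.length : Int) → ls.length - i.toNat ≤ k →
    altLoop ls (ls.length : Int) d i =
      segBuild d (PySem.Str.strip (PySem.List.pyGetD ls i "")) [] (ls.drop (i.toNat + 1)) := by
  intro k
  induction k with
  | zero => intro d i h0 hi hk; omega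
  | succ k ih =>
    intro d i h0 hi hk
    have hilen : i.toNat < ls.length := by omega
    rw [altLoop, dif_pos hi]
    have hi1 : (i + 1).toNat = i.toNat + 1 := by omega
    have hfind : altFind ls (ls.length : Int) (i + 1) =
        (i + 1) + (((ls.drop (i.toNat + 1)).takeWhile (fun l => !pB l)).length : Int) := by
      rw [altFind_spec ls (i + 1) (by omega), hi1]
    have hslice : PySem.List.slice ls (some (i + 1)) (some (altFind ls (ls.length : Int) (i + 1)))
        = (ls.drop (i.toNat + 1)).takeWhile (fun l => !pB l) := by
      rw [hfind]
      have h1 : i + 1 = ((i.toNat + 1 : Nat) : Int) := by omega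
      rw [h1, PySem.List.slice_natCast_add]
      exact (List.prefix_iff_eq_take.mp (List.takeWhile_prefix _)).symm
    rw [hslice, segBuild_split]
    generalize htw : (ls.drop (i.toNat + 1)).takeWhile (fun l => !pB l) = tw at hfind ⊢
    have hsplit : ls.drop (i.toNat + 1) =
        tw ++ (ls.drop (i.toNat + 1)).dropWhile (fun l => !pB l) := by
      rw [← htw]; exact List.takeWhile_append_dropWhile.symm
    have hdroplen : (ls.drop (i.toNat + 1)).length = ls.length - (i.toNat + 1) :=
      List.length_drop
    rcases hrest : (ls.drop (i.toNat + 1)).dropWhile (fun l => !pB l) with _ | ⟨l, t⟩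
    · -- no further boundary: the recursive call's index reaches the length, the loop stops
      have hsd : ls.drop (i.toNat + 1) = tw := by rw [hsplit, hrest, List.append_nil]
      have hlen : tw.length = ls.length - (i.toNat + 1) := by
        rw [← hsd]; exact hdroplen
      rw [altLoop, dif_neg (by rw [hfind]; omega)]
      simp
    · -- a further boundary: line j is the next header, recurse on the tail after it
      have hsd : ls.drop (i.toNat + 1) = tw ++ (l :: t) := by rw [hsplit, hrest]
      have hlen : tw.length + (t.length + 1) = ls.length - (i.toNat + 1) := by
        have h2 := congrArg List.length hsd
        simp at h2
        omega
      have hj := altFind_le ls (ls.length : Int) (i + 1)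
      have hjlt : altFind ls (ls.length : Int) (i + 1) < (ls.length : Int) := by
        rw [hfind]; omega
      have hjv : (altFind ls (ls.length : Int) (i + 1)).toNat = i.toNat + 1 + tw.length := by
        rw [hfind]; omega
      have hdj : ls.drop (i.toNat + 1 + tw.length) = l :: t := by
        rw [← List.drop_drop, hsd, List.drop_left]
      have hl2 : ls[i.toNat + 1 + tw.length]'(by omega) = l := by
        have hc := List.drop_eq_getElem_cons (show i.toNat + 1 + tw.length < ls.length by omega)
        rw [hdj] at hc
        exact ((List.cons.injEq _ _ _ _).mp hc.symm).1
      have hgetj : PySem.List.pyGetD ls (altFind ls (ls.length : Int) (i + 1)) "" = l := by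
        rw [PySem.List.pyGetD_eq_getElem ls "" (by omega) hjlt]
        simp only [hjv]
        exact hl2
      have hdj1 : ls.drop ((altFind ls (ls.length : Int) (i + 1)).toNat + 1) = t := by
        rw [hjv, ← List.drop_drop, hdj, List.drop_one, List.tail_cons]
      rw [ih _ _ (by omega) hjlt (by omega), hgetj, hdj1]
      simp

-- ===== VERDICT (by name: the statement is the Claim_ definition above) =====
theorem map_diffs_spec : Claim_equal_map_diffs := by
  intro patch_lines _hdom hpre
  unfold Spec_map_diffs
  match patch_lines with
  | [] => exact absurd rfl hpre
  | first :: rest =>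
    unfold map_diffs map_diffs_alt
    have hA := foldA_eq_segBuild rest PySem.Dict.empty (PySem.Str.strip first) []
    have hB := altLoop_eq (first :: rest) (first :: rest).length PySem.Dict.empty 0
      (by omega) (by simp) (by omega)
    simp only at hB
    rw [hB, PySem.List.pyGetD_zero_cons]
    simp only [Int.toNat_zero, List.drop_succ_cons, List.drop_zero]
    rw [← hA]

theorem map_diffs_raises : Claim_raises_map_diffs := by
  unfold Claim_raises_map_diffs
  refine ⟨fun pl _ hr hp => hp hr, by decide, rfl, ?_⟩
  rw [show map_diffs_alt pvRaiseWitness_map_diffs =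
    (altLoop [] ((0 : Nat) : Int) PySem.Dict.empty 0).items from rfl, altLoop]
  simp [pvRaiseWitnessOut_map_diffs, PySem.Dict.empty]

-- self-check: B's value at the raise witness, read off the raises theorem
theorem map_diffs_raises_ok :
    map_diffs_alt pvRaiseWitness_map_diffs = pvRaiseWitnessOut_map_diffs :=
  map_diffs_raises.2.2.2
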